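-- pv_equiv track=rewrite | github.com/Kiores23/ft_transcendence | srcs/requirements/authentication/src/authenticationApp/middlewares/asgi_middleware.py | path_matches_pattern
-- ===== SOURCE A (Python) =====
-- def path_matches_pattern(path, pattern):
--     path_parts = path.split('/')
--     pattern_parts = pattern.split('/')
--
--     if len(path_parts) != len(pattern_parts):
--         return False
--
--     for path_part, pattern_part in zip(path_parts, pattern_parts):
--         # If pattern of the segment has {}, it is a variable
--         if pattern_part.startswith('{') and pattern_part.endswith('}'):
--             continue
--         if path_part != pattern_part:
--             return False
--     return True
-- ===== SOURCE B (Python) =====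
-- def path_matches_pattern(path, pattern):
--     # Single-pass matcher: peel one segment at a time with str.partition and
--     # continue on the remainders; no split lists, no zip, no separate length
--     # check (the slash structure is enforced by comparing the partition separators).
--     while True:
--         aseg, asep, arest = path.partition('/')
--         pseg, psep, prest = pattern.partition('/')
--         variable = len(pseg) >= 2 and pseg[0] == '{' and pseg[-1] == '}'
--         if not variable and aseg != pseg:
--             return False
--         if asep != psep:
--             return False
--         if not asep:
--             return True
--         path, pattern = arest, prest
-- ===== Notes on version B (the rewrite author's own statement) =====
-- stated objective: alternative
-- what changed: B is a single-pass matcher that peels one segment at a time with str.partition and loops on the remainders, so there is no split into segment lists, no zip and no separate length check (the slash structure is enforced by comparing the partition separators).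
import Mathlib
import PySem

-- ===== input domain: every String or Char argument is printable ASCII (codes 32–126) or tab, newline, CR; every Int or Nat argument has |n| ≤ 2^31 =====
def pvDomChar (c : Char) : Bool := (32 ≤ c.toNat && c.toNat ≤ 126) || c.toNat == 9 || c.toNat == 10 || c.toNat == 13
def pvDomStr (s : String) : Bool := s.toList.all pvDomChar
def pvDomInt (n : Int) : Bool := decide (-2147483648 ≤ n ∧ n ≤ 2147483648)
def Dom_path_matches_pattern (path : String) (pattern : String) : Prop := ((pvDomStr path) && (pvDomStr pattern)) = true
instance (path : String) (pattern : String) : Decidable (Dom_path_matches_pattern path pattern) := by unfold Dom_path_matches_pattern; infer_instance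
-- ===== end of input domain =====

-- B replaces A's split/zip/length-check loop by a single-pass matcher that peels one
-- segment at a time with str.partition and continues on the remainders
-- (objective: alternative; same cost).


-- ===== PORT A =====
-- the for-loop over zip(path_parts, pattern_parts) with continue / early 'return False'
def pvALoop : List (String × String) → Bool
  | [] => true
  | (path_part, pattern_part) :: rest =>
    if PySem.Str.startswith pattern_part "{" && PySem.Str.endswith pattern_part "}" then
      pvALoop rest
    else if path_part ≠ pattern_part then false
    else pvALoop rest

-- split? "/" never returns none (separator is the nonempty literal "/"), so .getD [] is exact
def path_matches_pattern (path : String) (pattern : String) : Bool :=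
  let path_parts := (PySem.Str.split? path "/").getD []
  let pattern_parts := (PySem.Str.split? pattern "/").getD []
  if path_parts.length ≠ pattern_parts.length then false
  else pvALoop (path_parts.zip pattern_parts)

-- ===== PORT B =====
-- Source B's while-loop as structural recursion on the remainders, on the code-point lists;
-- str.partition('/') is ported exactly:
-- head part = takeWhile (≠ '/'), separator found ⇔ dropWhile is '/'::rest, remainder = rest;
-- 'len(pseg) >= 2 and pseg[0] == '{' and pseg[-1] == '}'' is the guarded head/last test
-- (pseg[-1] is only evaluated when len(pseg) >= 2, so headD/getLastD defaults are never hit).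
def pvBGo (qa : List Char) (pa : List Char) : Bool :=
  let aseg := qa.takeWhile (fun c => c ≠ '/')
  let pseg := pa.takeWhile (fun c => c ≠ '/')
  let variable_ := decide (2 ≤ pseg.length) && (pseg.headD ' ' == '{') && (pseg.getLastD ' ' == '}')
  if !variable_ && aseg ≠ pseg then false
  else
    match h1 : qa.dropWhile (fun c => c ≠ '/'), h2 : pa.dropWhile (fun c => c ≠ '/') with
    | [], [] => true
    | _ :: arest, _ :: prest => pvBGo arest prest
    | _, _ => false
termination_by qa.length
decreasing_by
  have h := List.length_dropWhile_le (fun c => c ≠ '/') qa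
  rw [h1] at h
  simp at h
  omega

def path_matches_pattern_alt (path : String) (pattern : String) : Bool :=
  pvBGo path.toList pattern.toList

-- ===== PRECONDITION & SPEC =====
def Spec_path_matches_pattern (path : String) (pattern : String) (out : Bool) : Prop := out = path_matches_pattern_alt path pattern
instance (path : String) (pattern : String) (out : Bool) : Decidable (Spec_path_matches_pattern path pattern out) := by unfold Spec_path_matches_pattern; infer_instance

-- ===== CLAIM (what is proved, stated in full; the proofs are below) =====
def Claim_equal_path_matches_pattern : Prop := ∀ (path : String) (pattern : String), Dom_path_matches_pattern path pattern → Spec_path_matches_pattern path pattern (path_matches_pattern path pattern)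

-- ===== LEMMAS AND PROOFS =====

theorem sgl_pre (a : Char) (l : List Char) :
    ([a].isPrefixOf l) = (match l with | [] => false | b :: _ => b == a) := by
  cases l <;> simp [List.isPrefixOf, eq_comm]

theorem sgl_suf (a : Char) (l : List Char) :
    ([a].isSuffixOf l) = (match l.getLast? with | none => false | some b => b == a) := by
  rw [List.isSuffixOf]
  show ([a].reverse.isPrefixOf l.reverse) = _
  rw [List.reverse_singleton, sgl_pre]
  cases h : l.reverse with
  | nil => simp [List.reverse_eq_nil_iff.mp h]
  | cons b t =>
    have : l.getLast? = some b := by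
      rw [← List.head?_reverse, h]; rfl
    simp [this]

theorem pvVar_eq (p : List Char) :
    (PySem.Chars.startswith p ['{'] && PySem.Chars.endswith p ['}']) =
      (decide (2 ≤ p.length) && (p.headD ' ' == '{') && (p.getLastD ' ' == '}')) := by
  rw [PySem.Chars.startswith, PySem.Chars.endswith, sgl_pre, sgl_suf]
  rcases p with _ | ⟨a, t⟩
  · rfl
  · rcases t with _ | ⟨b, t⟩
    · simp only [List.getLast?_singleton, List.headD_cons, List.getLastD_cons, List.length_cons,
        List.length_nil]
      by_cases ha : a = '{' <;> simp_all
    · have hne : (b :: t) ≠ ([] : List Char) := by simp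
      have hlast : (a :: b :: t).getLast? = some ((a :: b :: t).getLast (by simp)) :=
        List.getLast?_eq_some_getLast (by simp)
      simp [hlast, List.getLastD_eq_getLast?]

def pvSplitC (l : List Char) : List (List Char) :=
  l.takeWhile (fun c => c ≠ '/') ::
    match h1 : l.dropWhile (fun c => c ≠ '/') with
    | [] => []
    | _ :: rest => pvSplitC rest
termination_by l.length
decreasing_by
  have h := List.length_dropWhile_le (fun c => c ≠ '/') l
  rw [h1] at h
  simp at h
  omega

theorem pvSplitC_drop_nil {l : List Char} (h : l.dropWhile (fun c => c ≠ '/') = []) :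
    pvSplitC l = [l.takeWhile (fun c => c ≠ '/')] := by
  rw [pvSplitC]
  split
  · rfl
  · rename_i c rest heq
    rw [h] at heq
    exact (by cases heq)

theorem pvSplitC_drop_cons {l : List Char} {c : Char} {rest : List Char}
    (h : l.dropWhile (fun c => c ≠ '/') = c :: rest) :
    pvSplitC l = l.takeWhile (fun c => c ≠ '/') :: pvSplitC rest := by
  rw [pvSplitC]
  split
  · rename_i heq
    rw [h] at heq
    exact (by cases heq)
  · rename_i c' rest' heq
    rw [h] at heq
    cases heq
    rfl

theorem pvSplitC_ne_nil (l : List Char) : pvSplitC l ≠ [] := by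
  rw [pvSplitC]; simp

def pvPre (x : List Char) : List (List Char) → List (List Char)
  | [] => [x]
  | h :: t => (x ++ h) :: t

theorem pvSplitOn_go_eq (fuel : Nat) (l cur : List Char) (acc : List (List Char))
    (h : l.length ≤ fuel) :
    PySem.Chars.splitOn.go ['/'] fuel l cur acc = acc.reverse ++ pvPre cur.reverse (pvSplitC l) := by
  induction fuel generalizing l cur acc with
  | zero =>
    have hl : l = [] := List.length_eq_zero_iff.mp (Nat.le_zero.mp h)
    subst hl
    rw [PySem.Chars.splitOn.go]
    rw [pvSplitC_drop_nil (by simp)]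
    simp [pvPre]
  | succ n ih =>
    cases l with
    | nil =>
      rw [PySem.Chars.splitOn.go]
      rw [pvSplitC_drop_nil (by simp)]
      · simp [pvPre]
      · omega
    | cons c rest =>
      rw [PySem.Chars.splitOn.go]
      by_cases hc : c = '/'
      · subst hc
        have hpre : List.isPrefixOf ['/'] ('/' :: rest) = true := by simp [List.isPrefixOf]
        rw [if_pos hpre]
        have hdrop1 : List.drop (['/'] : List Char).length ('/' :: rest) = rest := rfl
        rw [hdrop1]
        have : rest.length ≤ n := by simpa using h
        rw [ih _ _ _ this]
        have hd : ('/' :: rest).dropWhile (fun c => c ≠ '/') = '/' :: rest := by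
          simp [List.dropWhile]
        rw [pvSplitC_drop_cons hd]
        have ht : ('/' :: rest).takeWhile (fun c => c ≠ '/') = [] := by
          simp [List.takeWhile]
        rw [ht]
        cases hsp : pvSplitC rest with
        | nil => exact absurd hsp (pvSplitC_ne_nil rest)
        | cons x xs => simp [pvPre]
      · have hpre : List.isPrefixOf ['/'] (c :: rest) = false := by
          simp [List.isPrefixOf]; exact fun hh => absurd hh.symm hc
        rw [if_neg (by simp [hpre])]
        have hlen : rest.length ≤ n := by simpa using h
        rw [ih _ _ _ hlen]
        have hd : (c :: rest).dropWhile (fun c => c ≠ '/') = rest.dropWhile (fun c => c ≠ '/') := by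
          simp [List.dropWhile, hc]
        have ht : (c :: rest).takeWhile (fun c => c ≠ '/') = c :: rest.takeWhile (fun c => c ≠ '/') := by
          simp [List.takeWhile, hc]
        cases hdr : rest.dropWhile (fun c => c ≠ '/') with
        | nil =>
          rw [pvSplitC_drop_nil (hd.trans hdr), pvSplitC_drop_nil hdr, ht]
          simp [pvPre]
        | cons x xs =>
          rw [pvSplitC_drop_cons (hd.trans hdr), pvSplitC_drop_cons hdr, ht]
          simp [pvPre]

theorem pvSplitOn_eq (l : List Char) : PySem.Chars.splitOn l ['/'] = pvSplitC l := by
  rw [PySem.Chars.splitOn, pvSplitOn_go_eq _ _ _ _ (by omega)]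
  cases hsp : pvSplitC l with
  | nil => exact absurd hsp (pvSplitC_ne_nil l)
  | cons x xs => simp [pvPre]

def pvALoopC : List (List Char × List Char) → Bool
  | [] => true
  | (q, p) :: rest =>
    if (decide (2 ≤ p.length) && (p.headD ' ' == '{') && (p.getLastD ' ' == '}')) = true then pvALoopC rest
    else if q ≠ p then false
    else pvALoopC rest

theorem pvALoop_map (l : List (List Char × List Char)) :
    pvALoop (l.map (fun qp => (String.ofList qp.1, String.ofList qp.2))) = pvALoopC l := by
  induction l with
  | nil => rfl
  | cons hd tl ih =>
    obtain ⟨q, p⟩ := hd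
    have hsw : PySem.Str.startswith (String.ofList p) "{" = PySem.Chars.startswith p ['{'] := by
      simp
    have hew : PySem.Str.endswith (String.ofList p) "}" = PySem.Chars.endswith p ['}'] := by
      simp
    have hne : (String.ofList q ≠ String.ofList p) ↔ q ≠ p := by
      constructor
      · intro hh he; exact hh (he ▸ rfl)
      · intro hh he
        exact hh (by simpa using congrArg String.toList he)
    simp only [List.map_cons, pvALoop, pvALoopC, hsw, hew, pvVar_eq, ih]
    by_cases hq : q = p <;> simp [hne, hq]

theorem pvSplitC_cons (l : List Char) :
    ∃ S, pvSplitC l = l.takeWhile (fun c => c ≠ '/') :: S := by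
  rw [pvSplitC]; exact ⟨_, rfl⟩

theorem pvSplitC_length_pos (l : List Char) : 1 ≤ (pvSplitC l).length := by
  cases hsp : pvSplitC l with
  | nil => exact absurd hsp (pvSplitC_ne_nil l)
  | cons x xs => simp

theorem pvMainAux : ∀ (n : Nat) (qa pa : List Char), qa.length < n →
    pvBGo qa pa =
      (if (pvSplitC qa).length ≠ (pvSplitC pa).length then false
       else pvALoopC ((pvSplitC qa).zip (pvSplitC pa))) := by
  intro n
  induction n with
  | zero => intro qa pa h; exact absurd h (Nat.not_lt_zero _)
  | succ n ih =>
    intro qa pa h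
    rw [pvBGo]
    split
    · -- the early 'return False': the pattern segment is not a variable and differs
      rename_i hc
      simp only [Bool.and_eq_true, Bool.not_eq_eq_eq_not, Bool.not_true, decide_eq_true_eq] at hc
      obtain ⟨S, hS⟩ := pvSplitC_cons qa
      obtain ⟨T, hT⟩ := pvSplitC_cons pa
      rw [hS, hT]
      simp only [List.zip_cons_cons, pvALoopC, hc.1, if_neg, ne_eq, hc.2, ite_true]
      split <;> rfl
    · rename_i hc
      simp only [Bool.and_eq_true, Bool.not_eq_eq_eq_not, Bool.not_true, decide_eq_true_eq,
        not_and] at hc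
      split
      · rename_i h1 h2
        rw [pvSplitC_drop_nil h1, pvSplitC_drop_nil h2]
        rw [if_neg (by simp)]
        by_cases hv : (decide (2 ≤ (pa.takeWhile (fun c => c ≠ '/')).length) &&
            ((pa.takeWhile (fun c => c ≠ '/')).headD ' ' == '{') &&
            ((pa.takeWhile (fun c => c ≠ '/')).getLastD ' ' == '}')) = true
        · simp only [pvALoopC, List.zip_cons_cons, List.zip_nil_right, hv, if_true]
        · have heq := not_not.mp (hc (Bool.not_eq_true _ ▸ hv))
          rw [Bool.not_eq_true] at hv
          simp only [pvALoopC, List.zip_cons_cons, List.zip_nil_right, hv, Bool.false_eq_true,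
            if_false, heq, ne_eq, not_true_eq_false, if_true]
      · rename_i qh qrest ph prest h1 h2
        have hlt : qrest.length < n := by
          have hw := List.length_dropWhile_le (fun c => c ≠ '/') qa
          rw [h1] at hw
          simp only [List.length_cons] at hw
          omega
        rw [ih qrest prest hlt, pvSplitC_drop_cons h1, pvSplitC_drop_cons h2]
        by_cases hv : (decide (2 ≤ (pa.takeWhile (fun c => c ≠ '/')).length) &&
            ((pa.takeWhile (fun c => c ≠ '/')).headD ' ' == '{') &&
            ((pa.takeWhile (fun c => c ≠ '/')).getLastD ' ' == '}')) = true
        · simp only [pvALoopC, List.zip_cons_cons, hv, if_true, List.length_cons, ne_eq,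
            Nat.add_right_cancel_iff]
        · have heq := not_not.mp (hc (Bool.not_eq_true _ ▸ hv))
          rw [Bool.not_eq_true] at hv
          simp only [pvALoopC, List.zip_cons_cons, hv, Bool.false_eq_true, if_false, heq, ne_eq,
            not_true_eq_false, if_true, List.length_cons, Nat.add_right_cancel_iff]
      · rename_i hx1 hx2
        cases hq' : qa.dropWhile (fun c => c ≠ '/') with
        | nil =>
          cases hp' : pa.dropWhile (fun c => c ≠ '/') with
          | nil => exact absurd (hx1 hq' hp') (fun f => f)
          | cons pc prest =>
            rw [pvSplitC_drop_nil hq', pvSplitC_drop_cons hp']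
            have hp := pvSplitC_length_pos prest
            have hne : ([qa.takeWhile (fun c => c ≠ '/')].length ≠
                (pa.takeWhile (fun c => c ≠ '/') :: pvSplitC prest).length) := by
              simp only [List.length_cons, List.length_singleton, List.length_nil]
              omega
            rw [if_pos hne]
        | cons qc qrest =>
          cases hp' : pa.dropWhile (fun c => c ≠ '/') with
          | nil =>
            rw [pvSplitC_drop_cons hq', pvSplitC_drop_nil hp']
            have hp := pvSplitC_length_pos qrest
            have hne : ((qa.takeWhile (fun c => c ≠ '/') :: pvSplitC qrest).length ≠
                [pa.takeWhile (fun c => c ≠ '/')].length) := by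
              simp only [List.length_cons, List.length_singleton, List.length_nil]
              omega
            rw [if_pos hne]
          | cons pc prest =>
            exact absurd (hx2 qc qrest pc prest hq' hp') (fun f => f)

theorem pvSplit_str (s : String) :
    (PySem.Str.split? s "/").getD [] = (pvSplitC s.toList).map String.ofList := by
  rw [PySem.Str.split?]
  have h : ("/" : String).toList = ['/'] := rfl
  rw [h, PySem.Chars.split?]
  simp [pvSplitOn_eq]

-- ===== VERDICT (by name: the statement is the Claim_ definition above) =====
theorem path_matches_pattern_spec : Claim_equal_path_matches_pattern := by
  intro path pattern _
  unfold Spec_path_matches_pattern path_matches_pattern path_matches_pattern_alt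
  rw [pvSplit_str, pvSplit_str,
    pvMainAux (path.toList.length + 1) path.toList pattern.toList (by omega)]
  simp only []
  rw [List.zip_map, List.length_map, List.length_map]
  have hmap : (Prod.map String.ofList String.ofList) =
      (fun qp : List Char × List Char => (String.ofList qp.1, String.ofList qp.2)) := rfl
  rw [hmap, pvALoop_map]
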